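-- pv_equiv track=rewrite | github.com/adofai07/PDF-merger | main.py | is_good_string
-- ===== SOURCE A (Python) =====
-- def is_good_string(s: str) -> bool:
--     if s.count("(") != s.count(")"):
--         return False
--
--     cnt = 0
--
--     for i in s:
--         if i == "(":
--             cnt += 1
--
--         if i == ")":
--             cnt -= 1
--
--         if cnt != 0 and cnt != 1:
--             return False
--
--     return True
-- ===== SOURCE B (Python) =====
-- def is_good_string(s: str) -> bool:
--     pstr = "".join(c for c in s if c in "()")
--     return pstr == "()" * (len(pstr) // 2)
-- ===== Notes on version B (the rewrite author's own statement) =====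
-- stated objective: simpler
-- what changed: Replaces the two count passes plus the running-depth loop and its per-character bound check with a single filter of the paren characters and one equality comparison against the pattern of repeated paren pairs.
import Mathlib
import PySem

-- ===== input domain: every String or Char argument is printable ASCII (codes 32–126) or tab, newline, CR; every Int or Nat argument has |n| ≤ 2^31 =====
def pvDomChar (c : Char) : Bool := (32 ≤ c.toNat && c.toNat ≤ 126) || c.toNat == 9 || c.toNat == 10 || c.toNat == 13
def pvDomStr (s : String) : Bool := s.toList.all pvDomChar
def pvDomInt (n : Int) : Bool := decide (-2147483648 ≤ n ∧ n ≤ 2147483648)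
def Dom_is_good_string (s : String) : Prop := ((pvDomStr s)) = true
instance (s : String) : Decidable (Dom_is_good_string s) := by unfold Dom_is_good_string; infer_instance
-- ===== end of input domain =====

-- B replaces the two count passes plus the running-depth loop with a filter of the
-- paren characters and one comparison against '()' repeated (objective: simpler).

-- ===== PORT A =====
-- the for-loop of A with its early 'return False'
def isGoodLoopA : List Char → Int → Bool
  | [], _ => true
  | i :: rest, cnt =>
    let cnt1 : Int := if i == '(' then cnt + 1 else cnt
    let cnt2 : Int := if i == ')' then cnt1 - 1 else cnt1
    if cnt2 ≠ 0 ∧ cnt2 ≠ 1 then false else isGoodLoopA rest cnt2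

def is_good_string (s : String) : Bool :=
  if PySem.Str.count s "(" ≠ PySem.Str.count s ")" then false
  else isGoodLoopA s.toList 0

-- ===== PORT B =====
def is_good_string_alt (s : String) : Bool :=
  -- pstr = "".join(c for c in s if c in "()")
  let pstr : List Char := s.toList.filter (fun c => PySem.Chars.isIn [c] ['(', ')'])
  -- pstr == "()" * (len(pstr) // 2)
  pstr == (List.replicate (pstr.length / 2) ['(', ')']).flatten

-- ===== PRECONDITION & SPEC =====
def Spec_is_good_string (s : String) (out : Bool) : Prop := out = is_good_string_alt s
instance (s : String) (out : Bool) : Decidable (Spec_is_good_string s out) := by unfold Spec_is_good_string; infer_instance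

-- ===== CLAIM (what is proved, stated in full; the proofs are below) =====
def Claim_equal_is_good_string : Prop := ∀ (s : String), Dom_is_good_string s → Spec_is_good_string s (is_good_string s)

-- ===== LEMMAS AND PROOFS =====

-- A string character c is in "()" iff it is one of the two paren characters
theorem isIn_parens (c : Char) :
    PySem.Chars.isIn [c] ['(', ')'] = (c == '(' || c == ')') := by
  rcases h : (c == '(' || c == ')') with _ | _
  · rw [PySem.Chars.isIn_eq_false_iff]
    intro hinf
    have hc : c ∈ ['(', ')'] := hinf.subset (by simp)
    simp at hc h
    rcases hc with hc | hc <;> simp [hc] at h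
  · rw [PySem.Chars.isIn_iff_infix]
    simp at h
    rcases h with h | h <;> subst h
    · exact ⟨[], [')'], rfl⟩
    · exact ⟨['('], [], rfl⟩

-- s.count("(") for a one-character needle is List.count
theorem count_go_single (c : Char) :
    ∀ (l : List Char) (fuel acc : Nat), l.length ≤ fuel →
      PySem.Chars.count.go [c] fuel l acc = acc + l.count c := by
  intro l
  induction l with
  | nil => intro fuel acc _; cases fuel <;> simp [PySem.Chars.count.go]
  | cons x t ih =>
    intro fuel acc hle
    cases fuel with
    | zero => simp at hle
    | succ n =>
      simp only [List.length_cons] at hle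
      rw [PySem.Chars.count.go]
      by_cases hx : x = c
      · subst hx
        simp only [List.isPrefixOf, beq_self_eq_true, Bool.and_eq_true, and_true,
          List.isPrefixOf_nil_left, if_pos, List.length_cons, List.length_nil,
          List.drop_succ_cons, List.drop_zero]
        rw [ih n (acc + 1) (by omega)]
        simp [List.count_cons]
        omega
      · have : List.isPrefixOf [c] (x :: t) = false := by
          simp [List.isPrefixOf]; exact fun h => absurd h.symm hx
        rw [this]
        simp only [Bool.false_eq_true, if_false]
        rw [ih n acc (by omega)]
        simp [List.count_cons, hx]

theorem strCount_single (s : String) (c : Char) (sub : String) (h : sub.toList = [c]) :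
    PySem.Str.count s sub = s.toList.count c := by
  rw [PySem.Str.count_eq, h]
  unfold PySem.Chars.count
  rw [if_neg (by simp)]
  simpa using count_go_single c s.toList s.toList.length 0 le_rfl

-- the reference shape both sides reduce to: '()' repeated
def altRep : List Char → Bool
  | [] => true
  | '(' :: ')' :: u => altRep u
  | _ => false

-- the counter update of one iteration of A's loop
def loopStep (i : Char) (cnt : Int) : Int :=
  if i == ')' then (if i == '(' then cnt + 1 else cnt) - 1
  else (if i == '(' then cnt + 1 else cnt)

theorem loopA_cons (i : Char) (rest : List Char) (cnt : Int) :
    isGoodLoopA (i :: rest) cnt =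
      if loopStep i cnt ≠ 0 ∧ loopStep i cnt ≠ 1 then false
      else isGoodLoopA rest (loopStep i cnt) := rfl

theorem loopStep_open (cnt : Int) : loopStep '(' cnt = cnt + 1 := by
  simp [loopStep, show (('(' : Char) == ')') = false from by decide,
    show (('(' : Char) == '(') = true from by decide]

theorem loopStep_close (cnt : Int) : loopStep ')' cnt = cnt - 1 := by
  simp [loopStep, show ((')' : Char) == ')') = true from by decide,
    show ((')' : Char) == '(') = false from by decide]

theorem loopStep_other (i : Char) (cnt : Int)
    (h1 : (i == '(') = false) (h2 : (i == ')') = false) : loopStep i cnt = cnt := by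
  simp [loopStep, h1, h2]

-- A's loop ignores non-paren characters when the counter is 0 or 1
theorem loopA_filter :
    ∀ (l : List Char) (cnt : Int), (cnt = 0 ∨ cnt = 1) →
      isGoodLoopA l cnt = isGoodLoopA (l.filter (fun c => c == '(' || c == ')')) cnt := by
  intro l
  induction l with
  | nil => intro cnt _; rfl
  | cons x t ih =>
    intro cnt hcnt
    by_cases hp : (x == '(' || x == ')') = true
    · have hf : List.filter (fun c => c == '(' || c == ')') (x :: t)
          = x :: List.filter (fun c => c == '(' || c == ')') t := by
        simp [List.filter_cons, hp]
      rw [hf, loopA_cons, loopA_cons]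
      by_cases hbad : loopStep x cnt ≠ 0 ∧ loopStep x cnt ≠ 1
      · rw [if_pos hbad, if_pos hbad]
      · rw [if_neg hbad, if_neg hbad]
        push_neg at hbad
        by_cases h0 : loopStep x cnt = 0
        · exact ih _ (Or.inl h0)
        · exact ih _ (Or.inr (hbad h0))
    · have hf : List.filter (fun c => c == '(' || c == ')') (x :: t)
          = List.filter (fun c => c == '(' || c == ')') t := by
        simp [List.filter_cons, hp]
      simp only [Bool.or_eq_true, not_or, Bool.not_eq_true] at hp
      rw [hf, loopA_cons, loopStep_other x cnt hp.1 hp.2]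
      have hok : ¬ (cnt ≠ 0 ∧ cnt ≠ 1) := by rcases hcnt with h | h <;> simp [h]
      rw [if_neg hok]
      exact ih cnt hcnt

-- two-step unfolding of altRep on a generic pair of characters
theorem altRep_eq (c1 c2 : Char) (u : List Char) :
    altRep (c1 :: c2 :: u) = if c1 = '(' ∧ c2 = ')' then altRep u else false := by
  conv_lhs => unfold altRep
  split
  · rename_i heq; exact absurd heq (by simp)
  · rename_i u' heq
    obtain ⟨e1, e2, e3⟩ : c1 = '(' ∧ c2 = ')' ∧ u = u' := by
      injection heq with a b; injection b with b c; exact ⟨a, b, c⟩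
    subst e1; subst e2; subst e3
    rw [if_pos ⟨rfl, rfl⟩]
  · rename_i hne hpat
    rw [if_neg]
    rintro ⟨e1, e2⟩
    exact hpat u (by rw [e1, e2])

-- on paren-only lists, count-equality plus A's loop is exactly the '()'-repetition shape
theorem loopA_alt :
    ∀ (t : List Char), (∀ c ∈ t, c = '(' ∨ c = ')') →
      ((decide (t.count '(' = t.count ')')) && isGoodLoopA t 0) = altRep t := by
  intro t
  induction t using altRep.induct with
  | case1 => simp [isGoodLoopA, altRep]
  | case2 u ih =>
    intro hmem
    have ihu := ih (fun c hc => hmem c (by simp [hc]))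
    show (decide _ && isGoodLoopA ('(' :: ')' :: u) 0) = altRep u
    have hloop : isGoodLoopA ('(' :: ')' :: u) 0 = isGoodLoopA u 0 := by
      rw [loopA_cons, loopStep_open, loopA_cons, loopStep_close]
      norm_num
    rw [hloop, ← ihu]
    simp
  | case3 t hne hsh =>
    intro hmem
    rcases t with _ | ⟨c1, _ | ⟨c2, u⟩⟩
    · exact absurd rfl hne
    · -- single char: counts differ, altRep false
      rcases hmem c1 (by simp) with h | h <;> subst h <;> simp [altRep]
    · -- two or more chars, not starting '(' ')'
      rcases hmem c1 (by simp) with h1 | h1 <;> rcases hmem c2 (by simp) with h2 | h2 <;>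
        subst h1 <;> subst h2
      · -- "((": loop fails at second char
        have hl : isGoodLoopA ('(' :: '(' :: u) 0 = false := by
          rw [loopA_cons, loopStep_open, loopA_cons, loopStep_open]; norm_num
        rw [hl]
        simp [altRep]
      · exact absurd rfl (hsh u)
      · -- ")(": loop fails at first char
        have hl : isGoodLoopA (')' :: '(' :: u) 0 = false := by
          rw [loopA_cons, loopStep_close]; norm_num
        rw [hl]
        simp [altRep]
      · have hl : isGoodLoopA (')' :: ')' :: u) 0 = false := by
          rw [loopA_cons, loopStep_close]; norm_num
        rw [hl]
        simp [altRep]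

-- B's comparison against '()' * (len // 2) is the same shape
theorem pattern_alt :
    ∀ (t : List Char),
      (t == (List.replicate (t.length / 2) ['(', ')']).flatten) = altRep t := by
  intro t
  induction t using altRep.induct with
  | case1 => rfl
  | case2 u ih =>
    show (('(' :: ')' :: u) == (List.replicate ((u.length + 1 + 1) / 2) ['(', ')']).flatten)
        = altRep u
    have h2 : (u.length + 1 + 1) / 2 = u.length / 2 + 1 := by omega
    rw [h2, List.replicate_succ, List.flatten_cons, ← ih]
    simp
  | case3 t hne hsh =>
    rcases t with _ | ⟨c1, _ | ⟨c2, u⟩⟩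
    · exact absurd rfl hne
    · simp [altRep]
    · have halt : altRep (c1 :: c2 :: u) = false := by
        rw [altRep_eq, if_neg]
        rintro ⟨e1, e2⟩
        exact hsh u (by rw [e1, e2])
      rw [halt]
      have hlen : (c1 :: c2 :: u).length / 2 = u.length / 2 + 1 := by simp; omega
      rw [hlen, List.replicate_succ, List.flatten_cons]
      simp only [List.cons_append, List.nil_append, List.cons_beq_cons, Bool.and_eq_false_iff]
      by_cases h1 : c1 = '(' <;> by_cases h2 : c2 = ')'
      · exact absurd (by rw [h1, h2]) (hsh u)
      · right; left; simp [h2]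
      · left; simp [h1]
      · left; simp [h1]

-- ===== VERDICT (by name: the statement is the Claim_ definition above) =====
theorem is_good_string_spec : Claim_equal_is_good_string := by
  intro s _
  unfold Spec_is_good_string is_good_string is_good_string_alt
  have hfil : s.toList.filter (fun c => PySem.Chars.isIn [c] ['(', ')'])
      = s.toList.filter (fun c => c == '(' || c == ')') := by
    apply List.filter_congr
    intro c _
    exact isIn_parens c
  rw [hfil]
  set t := s.toList.filter (fun c => c == '(' || c == ')') with ht
  have hmem : ∀ c ∈ t, c = '(' ∨ c = ')' := by
    intro c hc
    rw [ht, List.mem_filter] at hc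
    have := hc.2
    simp at this
    rcases this with h | h <;> [exact Or.inl h; exact Or.inr h]
  have hc1 : PySem.Str.count s "(" = s.toList.count '(' := strCount_single s '(' "(" (by decide)
  have hc2 : PySem.Str.count s ")" = s.toList.count ')' := strCount_single s ')' ")" (by decide)
  have hcf1 : t.count '(' = s.toList.count '(' := by
    rw [ht]; exact List.count_filter (by simp)
  have hcf2 : t.count ')' = s.toList.count ')' := by
    rw [ht]; exact List.count_filter (by simp)
  have hloop : isGoodLoopA s.toList 0 = isGoodLoopA t 0 := loopA_filter s.toList 0 (Or.inl rfl)
  show _ = (t == (List.replicate (t.length / 2) ['(', ')']).flatten)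
  rw [pattern_alt t, ← loopA_alt t hmem]
  rw [hc1, hc2, ← hcf1, ← hcf2, hloop]
  by_cases h : t.count '(' = t.count ')'
  · simp [h]
  · simp [h]
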